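-- pv_equiv track=rewrite | github.com/jw9603/CodeTree | 250402/보도블럭/crosswalk.py | cnt_pass
-- ===== SOURCE A (Python) =====
-- def can_pass(line, L):
--     n = len(line)
--     visited = [False] * n
--
--     for i in range(n - 1):
--         if line[i] == line[i + 1]:
--             continue
--
--         elif line[i] + 1 == line[i + 1]:
--             for j in range(i, i - L, -1):
--                 if j < 0 or line[j] != line[i] or visited[j]:
--                     return False
--                 visited[j] = True
--
--         elif line[i] - 1 == line[i + 1]:
--             for j in range(i + 1, i + 1 + L):
--                 if j >= n or line[j] != line[i + 1] or visited[j]: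
--                     return False
--                 visited[j] = True
--
--         else:
--             return False
--     return True
--
-- def cnt_pass(grid, L):
--     cnt = 0
--
--     for row in grid:
--         if can_pass(row, L):
--             cnt += 1
--
--     for col in zip(*grid):
--         if can_pass(col, L):
--             cnt += 1
--
--     return cnt
-- ===== SOURCE B (Python) =====
-- def can_pass(line, L):
--     # Running count of consecutive usable flat tiles instead of A's visited array.
--     n = len(line)
--     cnt = 1
--     for i in range(n - 1):
--         a, b = line[i], line[i + 1]
--         if a == b:
--             cnt += 1
--         elif a + 1 == b:
--             if cnt < L:
--                 return False
--             cnt = 1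
--         elif a - 1 == b:
--             for j in range(i + 1, i + 1 + L):
--                 if j >= n or line[j] != b:
--                     return False
--             cnt = 1 - L
--         else:
--             return False
--     return True
--
-- def cnt_pass(grid, L):
--     return sum(can_pass(row, L) for row in grid) + \
--            sum(can_pass(col, L) for col in zip(*grid))
-- ===== Notes on version B (the rewrite author's own statement) =====
-- stated objective: alternative
-- what changed: can_pass is re-implemented without A's visited array and backward re-scan: a single forward pass keeps a running counter of usable consecutive equal tiles (ascending step requires counter >= L; descending step checks the next L tiles in bounds and equal, then sets the counter to 1-L so the consumed ramp tiles can never feed a later ascending step), and cnt_pass becomes a sum of booleans over rows and zipped columns; O(1) auxiliary space instead of O(n) per line.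
import Mathlib
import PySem

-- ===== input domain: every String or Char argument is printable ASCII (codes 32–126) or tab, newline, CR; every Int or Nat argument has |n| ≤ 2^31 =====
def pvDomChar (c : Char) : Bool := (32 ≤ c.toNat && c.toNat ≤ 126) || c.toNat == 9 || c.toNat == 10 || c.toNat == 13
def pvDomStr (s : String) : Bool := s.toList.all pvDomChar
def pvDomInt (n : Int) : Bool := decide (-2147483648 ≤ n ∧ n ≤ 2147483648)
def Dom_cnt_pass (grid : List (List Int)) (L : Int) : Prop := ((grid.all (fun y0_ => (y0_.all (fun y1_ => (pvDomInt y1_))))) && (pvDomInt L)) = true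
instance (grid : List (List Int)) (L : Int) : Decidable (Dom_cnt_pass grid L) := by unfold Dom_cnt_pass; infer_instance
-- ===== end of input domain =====

-- B re-implements can_pass with a running counter of usable flat tiles instead of A's
-- visited array and backward re-scan; same return value, O(1) auxiliary space per line.

-- ===== PORT A =====
-- inner loop `for j in range(i, i-L, -1)` of the ascending branch: checks j<0, line[j]!=v,
-- visited[j] in Python's order, marks visited[j]=True; `none` = `return False`.
-- line[j] is ported as getD (in range whenever Python reads it, after the j<0 / j>=n guards).
def pvAscMark (line : List Int) (v : Int) : List Bool → Int → Nat → Option (List Bool)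
  | vis, _, 0 => some vis
  | vis, j, s+1 =>
    if j < 0 then none
    else if ¬ line.getD j.toNat 0 = v then none
    else if vis.getD j.toNat false = true then none
    else pvAscMark line v (vis.set j.toNat true) (j-1) s

-- inner loop `for j in range(i+1, i+1+L)` of the descending branch
def pvDescMark (line : List Int) (v : Int) (n : Nat) : List Bool → Nat → Nat → Option (List Bool)
  | vis, _, 0 => some vis
  | vis, j, s+1 =>
    if n ≤ j then none
    else if ¬ line.getD j 0 = v then none
    else if vis.getD j false = true then none
    else pvDescMark line v n (vis.set j true) (j+1) s

-- `for i in range(n-1)` of can_pass, carrying the visited list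
-- fuel = n - i keeps the recursion structural; it never runs out before the loop ends
def pvScanA (line : List Int) (L : Int) (n : Nat) : Nat → List Bool → Nat → Bool
  | 0, _, _ => true
  | fuel+1, vis, i =>
    if i + 1 < n then
      if line.getD i 0 = line.getD (i+1) 0 then pvScanA line L n fuel vis (i+1)
      else if line.getD i 0 + 1 = line.getD (i+1) 0 then
        match pvAscMark line (line.getD i 0) vis (i : Int) L.toNat with
        | none => false
        | some vis' => pvScanA line L n fuel vis' (i+1)
      else if line.getD i 0 - 1 = line.getD (i+1) 0 then
        match pvDescMark line (line.getD (i+1) 0) n vis (i+1) L.toNat with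
        | none => false
        | some vis' => pvScanA line L n fuel vis' (i+1)
      else false
    else true

def can_pass_A (line : List Int) (L : Int) : Bool :=
  pvScanA line L line.length line.length (List.replicate line.length false) 0

-- zip(*grid): tuples (as lists) of the k-th entries, k below the minimum row length
def pyZipStar (grid : List (List Int)) : List (List Int) :=
  match (grid.map List.length).min? with
  | none => []
  | some m => (List.range m).map (fun k => grid.map (fun r => r.getD k 0))

def cnt_pass (grid : List (List Int)) (L : Int) : Int :=
  let cnt := grid.foldl (fun c row => if can_pass_A row L then c + 1 else c) (0 : Int)
  (pyZipStar grid).foldl (fun c col => if can_pass_A col L then c + 1 else c) cnt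

-- ===== PORT B =====
-- descending branch of B: the next L tiles must exist and equal v (no visited array)
def pvDescChk (line : List Int) (v : Int) (n : Nat) : Nat → Nat → Bool
  | _, 0 => true
  | j, s+1 =>
    if n ≤ j then false
    else if ¬ line.getD j 0 = v then false
    else pvDescChk line v n (j+1) s

-- B's single forward pass with the running counter c
def pvScanB (line : List Int) (L : Int) (n : Nat) : Nat → Int → Nat → Bool
  | 0, _, _ => true
  | fuel+1, c, i =>
    if i + 1 < n then
      if line.getD i 0 = line.getD (i+1) 0 then pvScanB line L n fuel (c+1) (i+1)
      else if line.getD i 0 + 1 = line.getD (i+1) 0 then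
        if c < L then false else pvScanB line L n fuel 1 (i+1)
      else if line.getD i 0 - 1 = line.getD (i+1) 0 then
        if pvDescChk line (line.getD (i+1) 0) n (i+1) L.toNat then pvScanB line L n fuel (1-L) (i+1)
        else false
      else false
    else true

def can_pass_B (line : List Int) (L : Int) : Bool := pvScanB line L line.length line.length 1 0

-- sum(can_pass(row,L) for row in grid) + sum(can_pass(col,L) for col in zip(*grid))
def cnt_pass_alt (grid : List (List Int)) (L : Int) : Int :=
  ((grid.countP (fun row => can_pass_B row L) : Nat) : Int)
    + (((pyZipStar grid).countP (fun col => can_pass_B col L) : Nat) : Int)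

-- ===== PRECONDITION & SPEC =====
def Spec_cnt_pass (grid : List (List Int)) (L : Int) (out : Int) : Prop := out = cnt_pass_alt grid L
instance (grid : List (List Int)) (L : Int) (out : Int) : Decidable (Spec_cnt_pass grid L out) := by unfold Spec_cnt_pass; infer_instance

-- ===== CLAIM (what is proved, stated in full; the proofs are below) =====
def Claim_equal_cnt_pass : Prop := ∀ (grid : List (List Int)) (L : Int), Dom_cnt_pass grid L → Spec_cnt_pass grid L (cnt_pass grid L)

-- ===== LEMMAS AND PROOFS =====

lemma pvGetD_set_self (l : List Bool) (m : Nat) (b : Bool) (h : m < l.length) :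
    (l.set m b).getD m false = b := by
  simp [List.getD_eq_getElem?_getD, h]

lemma pvGetD_set_ne (l : List Bool) (m k : Nat) (b : Bool) (h : k ≠ m) :
    (l.set m b).getD k false = l.getD k false := by
  simp [List.getD_eq_getElem?_getD, List.getElem?_set_ne (Ne.symm h)]

-- loop invariant tying A's visited list to B's counter c, at left position i
def pvInv (line : List Int) (n i : Nat) (vis : List Bool) (c : Int) : Prop :=
  vis.length = n ∧ i < n ∧ c ≤ (i:Int) + 1 ∧ (i:Int) - c < (n:Int) ∧
  (∀ k : Nat, i < k → (vis.getD k false = true ↔ (k:Int) ≤ (i:Int) - c)) ∧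
  (∀ k : Nat, (i:Int) - c < (k:Int) → k ≤ i →
      line.getD k 0 = line.getD i 0 ∧ vis.getD k false = false) ∧
  (1 ≤ c → (i:Int) - c < 0 ∨ ¬ line.getD ((i:Int)-c).toNat 0 = line.getD i 0 ∨
      vis.getD ((i:Int)-c).toNat false = true) ∧
  (c ≤ 0 → vis.getD i false = true ∧
      ∀ k : Nat, i < k → (k:Int) ≤ (i:Int) - c → line.getD k 0 = line.getD i 0)

lemma ascMark_some (line : List Int) (v : Int) :
    ∀ (s : Nat) (j : Int) (vis : List Bool), j < (vis.length : Int) →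
    (∀ t : Nat, t < s → 0 ≤ j - t ∧ line.getD (j - t).toNat 0 = v ∧ vis.getD (j - t).toNat false = false) →
    ∃ vis', pvAscMark line v vis j s = some vis' ∧ vis'.length = vis.length ∧
      ∀ k : Nat, vis'.getD k false = (vis.getD k false || decide (j - s < (k:Int) ∧ (k:Int) ≤ j)) := by
  intro s
  induction s with
  | zero =>
    intro j vis hj hgood
    refine ⟨vis, rfl, rfl, fun k => ?_⟩
    have h : ¬(j - ((0:Nat):Int) < (k:Int) ∧ (k:Int) ≤ j) := by push_cast; omega
    simp [h]
  | succ s ih =>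
    intro j vis hj hgood
    obtain ⟨h0j, h0v, h0u⟩ := hgood 0 (by omega)
    rw [Nat.cast_zero, sub_zero] at h0j h0v h0u
    rw [pvAscMark, if_neg (by omega), if_neg (not_not_intro h0v), if_neg (by rw [h0u]; exact Bool.false_ne_true)]
    have hj' : j - 1 < ((vis.set j.toNat true).length : Int) := by
      rw [List.length_set]; omega
    have hgood' : ∀ t : Nat, t < s → 0 ≤ (j-1) - t ∧ line.getD ((j-1) - t).toNat 0 = v ∧
        (vis.set j.toNat true).getD ((j-1) - t).toNat false = false := by
      intro t ht
      obtain ⟨hgj, hgv, hgu⟩ := hgood (t+1) (by omega)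
      have hidx : (j-1) - (t:Int) = j - ((t+1:Nat):Int) := by push_cast; ring
      have hne : ((j-1) - (t:Int)).toNat ≠ j.toNat := by omega
      rw [hidx]
      exact ⟨by omega, hgv, by rw [← hidx, pvGetD_set_ne _ _ _ _ hne, hidx]; exact hgu⟩
    obtain ⟨vis', he, hlen, hform⟩ := ih (j-1) (vis.set j.toNat true) hj' hgood'
    refine ⟨vis', he, by rw [hlen, List.length_set], fun k => ?_⟩
    rw [hform k]
    by_cases hk : k = j.toNat
    · subst hk
      rw [pvGetD_set_self _ _ _ (by omega)]
      have ht : (j - ((s+1:Nat):Int) < ((j.toNat:Nat):Int) ∧ ((j.toNat:Nat):Int) ≤ j) := by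
        push_cast; omega
      rw [h0u]
      simp only [Bool.true_or, Bool.false_or]
      exact (decide_eq_true ht).symm
    · rw [pvGetD_set_ne _ _ _ _ hk]
      have hiff : ((j-1) - (s:Int) < (k:Int) ∧ (k:Int) ≤ j - 1) ↔
          (j - ((s+1:Nat):Int) < (k:Int) ∧ (k:Int) ≤ j) := by
        push_cast; omega
      rw [decide_eq_decide.mpr hiff]

lemma ascMark_none (line : List Int) (v : Int) :
    ∀ (cN s : Nat) (j : Int) (vis : List Bool), cN < s →
    (∀ t : Nat, t < cN → 0 ≤ j - t ∧ line.getD (j - t).toNat 0 = v ∧ vis.getD (j - t).toNat false = false) →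
    (j - cN < 0 ∨ ¬ line.getD (j - cN).toNat 0 = v ∨ vis.getD (j - cN).toNat false = true) →
    pvAscMark line v vis j s = none := by
  intro cN
  induction cN with
  | zero =>
    intro s j vis hs hgood hbad
    rw [Nat.cast_zero, sub_zero] at hbad
    obtain ⟨s, rfl⟩ : ∃ s', s = s' + 1 := ⟨s - 1, by omega⟩
    rw [pvAscMark]
    by_cases hb1 : j < 0
    · rw [if_pos hb1]
    · rw [if_neg hb1]
      by_cases hb2 : line.getD j.toNat 0 = v
      · have hv : vis.getD j.toNat false = true := by
          rcases hbad with h | h | h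
          · omega
          · exact absurd hb2 h
          · exact h
        rw [if_neg (not_not_intro hb2), if_pos hv]
      · rw [if_pos hb2]
  | succ cN ih =>
    intro s j vis hs hgood hbad
    obtain ⟨h0j, h0v, h0u⟩ := hgood 0 (by omega)
    rw [Nat.cast_zero, sub_zero] at h0j h0v h0u
    obtain ⟨s, rfl⟩ : ∃ s', s = s' + 1 := ⟨s - 1, by omega⟩
    rw [pvAscMark, if_neg (by omega), if_neg (not_not_intro h0v), if_neg (by rw [h0u]; exact Bool.false_ne_true)]
    apply ih s (j-1) (vis.set j.toNat true) (by omega)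
    · intro t ht
      obtain ⟨hgj, hgv, hgu⟩ := hgood (t+1) (by omega)
      have hidx : (j-1) - (t:Int) = j - ((t+1:Nat):Int) := by push_cast; ring
      have hne : ((j-1) - (t:Int)).toNat ≠ j.toNat := by omega
      rw [hidx]
      exact ⟨by omega, hgv, by rw [← hidx, pvGetD_set_ne _ _ _ _ hne, hidx]; exact hgu⟩
    · have hidx : (j-1) - (cN:Int) = j - ((cN+1:Nat):Int) := by push_cast; ring
      by_cases hnegi : (j-1) - (cN:Int) < 0
      · exact Or.inl hnegi
      · rcases hbad with h | h | h
        · omega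
        · exact Or.inr (Or.inl (by rw [hidx]; exact h))
        · refine Or.inr (Or.inr ?_)
          have hne : ((j-1) - (cN:Int)).toNat ≠ j.toNat := by omega
          rw [pvGetD_set_ne _ _ _ _ hne, hidx]
          exact h

lemma descChk_true (line : List Int) (v : Int) (n : Nat) :
    ∀ (s j : Nat), pvDescChk line v n j s = true →
      ∀ t : Nat, t < s → j + t < n ∧ line.getD (j + t) 0 = v := by
  intro s
  induction s with
  | zero => intro j h t ht; omega
  | succ s ih =>
    intro j h t ht
    rw [pvDescChk] at h
    by_cases h1 : n ≤ j
    · rw [if_pos h1] at h; exact absurd h (by simp)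
    · rw [if_neg h1] at h
      by_cases h2 : line.getD j 0 = v
      · rw [if_neg (by simpa using h2)] at h
        cases t with
        | zero => exact ⟨by omega, by simpa using h2⟩
        | succ t =>
          rw [show j + (t+1) = j + 1 + t from by omega]
          exact ih (j+1) h t (by omega)
      · rw [if_pos (by simpa using h2)] at h; exact absurd h (by simp)

lemma descMark_eq (line : List Int) (v : Int) (n : Nat) :
    ∀ (s j : Nat) (vis : List Bool), vis.length = n →
    (∀ t : Nat, t < s → vis.getD (j + t) false = false) →
    (pvDescChk line v n j s = false → pvDescMark line v n vis j s = none) ∧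
    (pvDescChk line v n j s = true → ∃ vis', pvDescMark line v n vis j s = some vis' ∧
        vis'.length = n ∧
        ∀ k : Nat, vis'.getD k false = (vis.getD k false || decide (j ≤ k ∧ k < j + s))) := by
  intro s
  induction s with
  | zero =>
    intro j vis hlen hunv
    constructor
    · intro h; exact absurd h (by rw [pvDescChk]; simp)
    · intro _
      refine ⟨vis, rfl, hlen, fun k => ?_⟩
      have h : ¬(j ≤ k ∧ k < j + 0) := by omega
      simp [h]
  | succ s ih =>
    intro j vis hlen hunv
    by_cases h1 : n ≤ j
    · rw [pvDescChk, if_pos h1, pvDescMark, if_pos h1]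
      exact ⟨fun _ => rfl, fun h => absurd h (by simp)⟩
    · by_cases h2 : line.getD j 0 = v
      · have h0u : vis.getD j false = false := by
          have := hunv 0 (by omega); rwa [Nat.add_zero] at this
        rw [pvDescChk, if_neg h1, if_neg (not_not_intro h2),
            pvDescMark, if_neg h1, if_neg (not_not_intro h2),
            if_neg (by rw [h0u]; exact Bool.false_ne_true)]
        have hlen' : (vis.set j true).length = n := by rw [List.length_set]; exact hlen
        have hunv' : ∀ t : Nat, t < s → (vis.set j true).getD (j + 1 + t) false = false := by
          intro t ht
          rw [pvGetD_set_ne _ _ _ _ (by omega)]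
          have := hunv (t+1) (by omega)
          rwa [show j + (t+1) = j + 1 + t from by omega] at this
        obtain ⟨ihn, ihs⟩ := ih (j+1) (vis.set j true) hlen' hunv'
        constructor
        · exact ihn
        · intro hchk
          obtain ⟨vis', he, hl, hform⟩ := ihs hchk
          refine ⟨vis', he, hl, fun k => ?_⟩
          rw [hform k]
          by_cases hk : k = j
          · rw [hk, pvGetD_set_self _ _ _ (by omega), h0u]
            have ht : j ≤ j ∧ j < j + (s+1) := by omega
            simp [ht]
          · rw [pvGetD_set_ne _ _ _ _ hk]
            have hiff : (j + 1 ≤ k ∧ k < j + 1 + s) ↔ (j ≤ k ∧ k < j + (s+1)) := by omega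
            rw [decide_eq_decide.mpr hiff]
      · rw [pvDescChk, if_neg h1, if_pos h2, pvDescMark, if_neg h1, if_pos h2]
        exact ⟨fun _ => rfl, fun h => absurd h (by simp)⟩

lemma scan_eq (line : List Int) (L : Int) (n : Nat) (hL : 1 ≤ L) :
    ∀ (f i : Nat) (vis : List Bool) (c : Int), pvInv line n i vis c →
      pvScanA line L n f vis i = pvScanB line L n f c i := by
  intro f
  induction f with
  | zero =>
    intro i vis c _
    rfl
  | succ f ih =>
    intro i vis c hInv
    obtain ⟨hlen, hin, hci, hicn, hvis, hgood, hbad, hneg⟩ := hInv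
    have hvisF : ∀ k : Nat, i < k → ¬((k:Int) ≤ (i:Int) - c) → vis.getD k false = false := by
      intro k hk hle
      rcases Bool.eq_false_or_eq_true (vis.getD k false) with h | h
      · exact absurd ((hvis k hk).mp h) hle
      · exact h
    rw [pvScanA, pvScanB]
    by_cases h1 : i + 1 < n
    case neg => rw [if_neg h1, if_neg h1]
    case pos =>
    rw [if_pos h1, if_pos h1]
    by_cases he : line.getD i 0 = line.getD (i+1) 0
    · rw [if_pos he, if_pos he]
      refine ih (i+1) vis (c+1)
        ⟨hlen, h1, by push_cast; omega, by push_cast at hicn ⊢; omega, ?_, ?_, ?_, ?_⟩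
      · intro k hk
        rw [hvis k (by omega)]
        push_cast
        omega
      · intro k hk1 hk2
        by_cases hk3 : k ≤ i
        · obtain ⟨hv1, hv2⟩ := hgood k (by push_cast at hk1 ⊢; omega) hk3
          exact ⟨hv1.trans he, hv2⟩
        · have hkk : k = i + 1 := by omega
          rw [hkk]
          exact ⟨rfl, hvisF (i+1) (by omega) (by push_cast at hk1 ⊢; omega)⟩
      · intro _
        have hidx : ((i+1:Nat):Int) - (c+1) = (i:Int) - c := by push_cast; ring
        rw [hidx]
        by_cases hc2 : 1 ≤ c
        · rcases hbad hc2 with h | h | h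
          · exact Or.inl h
          · exact Or.inr (Or.inl (fun hh => h (hh.trans he.symm)))
          · exact Or.inr (Or.inr h)
        · by_cases hc3 : c ≤ -1
          · exact Or.inl (by omega)
          · refine Or.inr (Or.inr ?_)
            rw [show ((i:Int) - c).toNat = i from by omega]
            exact (hneg (by omega)).1
      · intro hc
        obtain ⟨hv, htail⟩ := hneg (by omega)
        refine ⟨(hvis (i+1) (by omega)).mpr (by push_cast; omega), ?_⟩
        intro k hk1 hk2
        exact (htail k (by omega) (by push_cast at hk2 ⊢; omega)).trans he
    · rw [if_neg he, if_neg he]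
      have hc0 : 0 ≤ c := by
        by_contra hc
        push_neg at hc
        exact he ((hneg (by omega)).2 (i+1) (by omega) (by push_cast; omega)).symm
      by_cases ha : line.getD i 0 + 1 = line.getD (i+1) 0
      · rw [if_pos ha, if_pos ha]
        by_cases hcL : c < L
        · rw [if_pos hcL]
          have hmn : pvAscMark line (line.getD i 0) vis (i:Int) L.toNat = none := by
            apply ascMark_none line _ c.toNat L.toNat (i:Int) vis (by omega)
            · intro t ht
              have hidx : ((i:Int) - (t:Int)).toNat = i - t := by omega
              obtain ⟨hv1, hv2⟩ := hgood (i - t) (by push_cast; omega) (by omega)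
              exact ⟨by omega, by rw [hidx]; exact hv1, by rw [hidx]; exact hv2⟩
            · rw [show ((c.toNat:Nat):Int) = c from by omega]
              by_cases hc1 : 1 ≤ c
              · exact hbad hc1
              · refine Or.inr (Or.inr ?_)
                rw [show ((i:Int) - c).toNat = i from by omega]
                exact (hneg (by omega)).1
          rw [hmn]
        · rw [if_neg hcL]
          have hgoods : ∀ t : Nat, t < L.toNat → 0 ≤ (i:Int) - t ∧
              line.getD ((i:Int) - t).toNat 0 = line.getD i 0 ∧
              vis.getD ((i:Int) - t).toNat false = false := by
            intro t ht
            have hidx : ((i:Int) - (t:Int)).toNat = i - t := by omega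
            obtain ⟨hv1, hv2⟩ := hgood (i - t) (by push_cast; omega) (by omega)
            exact ⟨by omega, by rw [hidx]; exact hv1, by rw [hidx]; exact hv2⟩
          obtain ⟨vis', hm, hlen', hform⟩ := ascMark_some line (line.getD i 0) L.toNat (i:Int) vis
            (by rw [hlen]; push_cast; omega) hgoods
          rw [hm]
          refine ih (i+1) vis' 1
            ⟨hlen'.trans hlen, h1, by push_cast; omega, by push_cast; omega, ?_, ?_, ?_, ?_⟩
          · intro k hk
            rw [hform k, hvisF k (by omega) (by push_cast; omega), Bool.false_or, decide_eq_true_eq]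
            push_cast
            omega
          · intro k hk1 hk2
            have hkk : k = i + 1 := by push_cast at hk1 hk2; omega
            rw [hkk]
            refine ⟨rfl, ?_⟩
            rw [hform (i+1), hvisF (i+1) (by omega) (by push_cast; omega), Bool.false_or,
              decide_eq_false_iff_not]
            push_cast
            omega
          · intro _
            refine Or.inr (Or.inr ?_)
            rw [show (((i+1:Nat):Int) - 1).toNat = i from by push_cast; omega, hform i]
            have ht : (i:Int) - (L.toNat:Int) < (i:Int) ∧ (i:Int) ≤ (i:Int) := by omega
            simp [ht] <;> omega
          · intro hcon
            exact absurd hcon (by norm_num)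
      · rw [if_neg ha, if_neg ha]
        by_cases hdn : line.getD i 0 - 1 = line.getD (i+1) 0
        · rw [if_pos hdn, if_pos hdn]
          have hunv : ∀ t : Nat, t < L.toNat → vis.getD (i+1+t) false = false := by
            intro t ht
            exact hvisF (i+1+t) (by omega) (by push_cast; omega)
          obtain ⟨hmn, hms⟩ := descMark_eq line (line.getD (i+1) 0) n L.toNat (i+1) vis hlen hunv
          cases hchk : pvDescChk line (line.getD (i+1) 0) n (i+1) L.toNat with
          | false =>
            rw [hmn hchk]
            simp
          | true =>
            obtain ⟨vis', hm, hlen', hform⟩ := hms hchk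
            rw [hm, if_pos rfl]
            have hbnd := descChk_true line (line.getD (i+1) 0) n L.toNat (i+1) hchk
            refine ih (i+1) vis' (1-L)
              ⟨hlen', h1, by push_cast; omega, ?_, ?_, ?_, ?_, ?_⟩
            · have := (hbnd (L.toNat - 1) (by omega)).1
              push_cast
              omega
            · intro k hk
              rw [hform k, hvisF k (by omega) (by push_cast; omega), Bool.false_or,
                decide_eq_true_eq]
              push_cast
              omega
            · intro k hk1 hk2
              exfalso
              push_cast at hk1 hk2
              omega
            · intro hc1
              exfalso
              omega
            · intro _
              constructor
              · rw [hform (i+1)]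
                have ht : i+1 ≤ i+1 ∧ i+1 < i+1+L.toNat := by omega
                simp [ht] <;> omega
              · intro k hk1 hk2
                have hkt : k = (i+1) + (k - (i+1)) := by omega
                have hv := (hbnd (k - (i+1)) (by push_cast at hk2; omega)).2
                rw [hkt]
                exact hv
        · rw [if_neg hdn, if_neg hdn]

lemma scan_eq_nonpos (line : List Int) (L : Int) (n : Nat) (hL : L ≤ 0) :
    ∀ (f i : Nat) (vis : List Bool) (c : Int), 1 ≤ c →
      pvScanA line L n f vis i = pvScanB line L n f c i := by
  intro f
  induction f with
  | zero =>
    intro i vis c hc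
    rfl
  | succ f ih =>
    intro i vis c hc
    rw [pvScanA, pvScanB]
    by_cases h1 : i + 1 < n
    case neg => rw [if_neg h1, if_neg h1]
    case pos =>
    rw [if_pos h1, if_pos h1]
    have hLt : L.toNat = 0 := by omega
    by_cases he : line.getD i 0 = line.getD (i+1) 0
    · rw [if_pos he, if_pos he]
      exact ih (i+1) vis (c+1) (by omega)
    · rw [if_neg he, if_neg he]
      by_cases ha : line.getD i 0 + 1 = line.getD (i+1) 0
      · rw [if_pos ha, if_pos ha, hLt, if_neg (by omega : ¬ c < L)]
        exact ih (i+1) vis 1 (by omega)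
      · rw [if_neg ha, if_neg ha]
        by_cases hdn : line.getD i 0 - 1 = line.getD (i+1) 0
        · rw [if_pos hdn, if_pos hdn, hLt,
            show pvDescChk line (line.getD (i+1) 0) n (i+1) 0 = true from rfl, if_pos rfl]
          exact ih (i+1) vis (1-L) (by omega)
        · rw [if_neg hdn, if_neg hdn]

lemma pvGetD_replicate (m k : Nat) : (List.replicate m false).getD k false = false := by
  simp [List.getD_eq_getElem?_getD, List.getElem?_replicate]
  split <;> rfl

lemma can_pass_eq (line : List Int) (L : Int) : can_pass_A line L = can_pass_B line L := by
  unfold can_pass_A can_pass_B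
  by_cases hL : L ≤ 0
  · exact scan_eq_nonpos line L line.length hL line.length 0 _ 1 (by omega)
  · by_cases hn : line.length = 0
    · rw [hn]; rfl
    · refine scan_eq line L line.length (by omega) line.length 0 _ 1
        ⟨List.length_replicate, by omega, by omega, by omega, ?_, ?_, ?_, ?_⟩
      · intro k hk
        rw [pvGetD_replicate]
        constructor
        · intro h
          exact absurd h (by simp)
        · intro h
          exfalso
          push_cast at h
          omega
      · intro k hk1 hk2
        have hk0 : k = 0 := by omega
        rw [hk0]
        exact ⟨rfl, pvGetD_replicate _ _⟩
      · intro _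
        exact Or.inl (by omega)
      · intro h
        exact absurd h (by norm_num)

lemma foldl_count (L : Int) (l : List (List Int)) : ∀ acc : Int,
    l.foldl (fun c row => if can_pass_A row L then c + 1 else c) acc
      = acc + ((l.countP (fun r => can_pass_B r L) : Nat) : Int) := by
  induction l with
  | nil => intro acc; simp
  | cons hd tl ih =>
    intro acc
    rw [List.foldl_cons, List.countP_cons, ih, can_pass_eq]
    by_cases h : can_pass_B hd L = true <;> simp [h] <;> push_cast <;> omega

-- ===== VERDICT (by name: the statement is the Claim_ definition above) =====
theorem cnt_pass_spec : Claim_equal_cnt_pass := by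
  intro grid L _
  unfold Spec_cnt_pass cnt_pass cnt_pass_alt
  simp only [foldl_count]
  push_cast
  omega
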